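-- pv_equiv track=rewrite | github.com/anthony-lamelas/Panelize_backend | app/services/openai_service.py | _parse_gpt_panels
-- ===== SOURCE A (Python) =====
-- def _parse_gpt_panels(gpt_content: str, num_panels: int) -> list[str]:
--     """Parse GPT output into individual panel prompts"""
--     lines = gpt_content.strip().split("\n")
--     panel_prompts = []
--     current_prompt = []
--
--     for line in lines:
--         if "Panel" in line and ":" in line:
--             # If we have an existing prompt, finalize it
--             if current_prompt:
--                 panel_prompts.append("\n".join(current_prompt).strip())
--                 current_prompt = []
--
--             # Start a new prompt
--             current_prompt.append(line.split(":", 1)[1].strip())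
--         else:
--             current_prompt.append(line.strip())
--
--     # Add last prompt
--     if current_prompt:
--         panel_prompts.append("\n".join(current_prompt).strip())
--
--     return panel_prompts[:num_panels]
-- ===== SOURCE B (Python) =====
-- def _parse_gpt_panels(gpt_content: str, num_panels: int) -> list[str]:
--     """Segment-at-a-time: repeatedly peel one panel (head line + maximal run of
--     non-header lines) off the front of the line list; no flush-on-header state."""
--
--     def is_hdr(line):
--         return "Panel" in line and ":" in line
--
--     def split_run(ls):
--         # stripped maximal non-header prefix, and the remainder
--         i = 0
--         while i < len(ls) and not is_hdr(ls[i]):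
--             i += 1
--         return [l.strip() for l in ls[:i]], ls[i:]
--
--     prompts = []
--     ls = gpt_content.strip().split("\n")
--     while ls:
--         head = ls[0].split(":", 1)[1].strip() if is_hdr(ls[0]) else ls[0].strip()
--         body, ls = split_run(ls[1:])
--         prompts.append("\n".join([head] + body).strip())
--     return prompts[:num_panels]
-- ===== Notes on version B (the rewrite author's own statement) =====
-- stated objective: alternative
-- what changed: B parses segment-at-a-time: an outer loop repeatedly peels one panel (header/first line plus the maximal run of following non-header lines, found by an index scan) off the front of the line list, replacing A's single forward pass with flush-previous-accumulator-on-header state logic.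
import Mathlib
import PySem

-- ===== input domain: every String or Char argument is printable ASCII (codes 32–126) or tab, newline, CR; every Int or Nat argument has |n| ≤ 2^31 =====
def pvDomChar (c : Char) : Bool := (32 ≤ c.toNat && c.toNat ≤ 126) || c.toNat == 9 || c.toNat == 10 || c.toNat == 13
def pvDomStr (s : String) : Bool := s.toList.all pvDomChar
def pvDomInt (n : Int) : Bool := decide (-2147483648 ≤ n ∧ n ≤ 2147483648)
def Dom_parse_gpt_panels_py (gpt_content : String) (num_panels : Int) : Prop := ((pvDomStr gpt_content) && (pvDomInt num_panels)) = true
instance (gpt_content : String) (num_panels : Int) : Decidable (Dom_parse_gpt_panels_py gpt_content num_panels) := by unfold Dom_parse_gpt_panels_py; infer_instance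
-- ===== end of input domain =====

-- B peels one panel at a time (header line + maximal run of non-header lines) off the
-- front of the line list, instead of A's forward loop with flush-on-header accumulator
-- state (objective: alternative).

-- shared sub-expressions of both Pythons
-- '"Panel" in line and ":" in line'
def pvHdr (line : String) : Bool := PySem.Str.isIn "Panel" line && PySem.Str.isIn ":" line
-- 'line.split(":", 1)[1].strip()' — used only when ':' ∈ line, so part 1 exists and the default is never taken
def pvAfter (line : String) : String :=
  PySem.Str.strip (PySem.List.pyGetD ((PySem.Str.splitMax? line ":" 1).getD []) 1 "")
-- '"\n".join(cur).strip()'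
def pvFin (cur : List String) : String := PySem.Str.strip (PySem.Str.join "\n" cur)

-- ===== PORT A =====
def parse_gpt_panels_py (gpt_content : String) (num_panels : Int) : List String :=
  let lines := (PySem.Str.split? (PySem.Str.strip gpt_content) "\n").getD []
  let st := lines.foldl
    (fun (acc : List String × List String) line =>
      if pvHdr line then
        (if acc.2 ≠ [] then acc.1 ++ [pvFin acc.2] else acc.1, [pvAfter line])
      else
        (acc.1, acc.2 ++ [PySem.Str.strip line])) ([], [])
  let panel_prompts := if st.2 ≠ [] then st.1 ++ [pvFin st.2] else st.1
  PySem.List.slice panel_prompts none (some num_panels)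

-- ===== PORT B =====
-- 'ls[0].split(":", 1)[1].strip() if is_hdr(ls[0]) else ls[0].strip()'
def pvBHead (l : String) : String := if pvHdr l then pvAfter l else PySem.Str.strip l

-- the 'while ls:' loop of Source B as structural recursion; split_run's index scan is the
-- takeWhile/dropWhile split at the first header (exact: same split point i)
def pvBSeg : List String → List String
  | [] => []
  | l :: ls =>
    pvFin (pvBHead l :: (ls.takeWhile (fun x => !pvHdr x)).map PySem.Str.strip)
      :: pvBSeg (ls.dropWhile (fun x => !pvHdr x))
termination_by ls => ls.length
decreasing_by
  have := (List.dropWhile_sublist (p := fun x => !pvHdr x) (l := ls)).length_le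
  simp only [List.length_cons]
  omega

def parse_gpt_panels_py_alt (gpt_content : String) (num_panels : Int) : List String :=
  PySem.List.slice (pvBSeg ((PySem.Str.split? (PySem.Str.strip gpt_content) "\n").getD []))
    none (some num_panels)

-- ===== PRECONDITION & SPEC =====
def Spec_parse_gpt_panels_py (gpt_content : String) (num_panels : Int) (out : List String) : Prop := out = parse_gpt_panels_py_alt gpt_content num_panels
instance (gpt_content : String) (num_panels : Int) (out : List String) : Decidable (Spec_parse_gpt_panels_py gpt_content num_panels out) := by unfold Spec_parse_gpt_panels_py; infer_instance

-- ===== CLAIM (what is proved, stated in full; the proofs are below) =====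
def Claim_equal_parse_gpt_panels_py : Prop := ∀ (gpt_content : String) (num_panels : Int), Dom_parse_gpt_panels_py gpt_content num_panels → Spec_parse_gpt_panels_py gpt_content num_panels (parse_gpt_panels_py gpt_content num_panels)

-- ===== LEMMAS AND PROOFS =====

-- the segmentation A's loop computes: cur = stripped lines of the pending segment
def pvSegs (cur : List String) : List String → List String
  | [] => if cur ≠ [] then [pvFin cur] else []
  | l :: ls =>
    if pvHdr l then (if cur ≠ [] then [pvFin cur] else []) ++ pvSegs [pvAfter l] ls
    else pvSegs (cur ++ [PySem.Str.strip l]) ls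

lemma pvA_lem (ls : List String) : ∀ (pp cur : List String),
    (let st := ls.foldl
      (fun (acc : List String × List String) line =>
        if pvHdr line then
          (if acc.2 ≠ [] then acc.1 ++ [pvFin acc.2] else acc.1, [pvAfter line])
        else
          (acc.1, acc.2 ++ [PySem.Str.strip line])) (pp, cur);
     if st.2 ≠ [] then st.1 ++ [pvFin st.2] else st.1) = pp ++ pvSegs cur ls := by
  induction ls with
  | nil => intro pp cur; simp only [List.foldl_nil, pvSegs]; split_ifs <;> simp
  | cons l ls ih =>
    intro pp cur
    simp only [List.foldl_cons, pvSegs]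
    by_cases h : pvHdr l = true
    · simp only [h, if_true]
      rw [ih]
      split_ifs <;> simp [List.append_assoc]
    · simp only [h, if_false, Bool.false_eq_true]
      rw [ih]

lemma pvSegs_run (ls : List String) : ∀ (cur : List String), cur ≠ [] →
    pvSegs cur ls
      = pvFin (cur ++ (ls.takeWhile (fun x => !pvHdr x)).map PySem.Str.strip)
          :: pvBSeg (ls.dropWhile (fun x => !pvHdr x)) := by
  induction ls with
  | nil => intro cur h; simp [pvSegs, pvBSeg, h]
  | cons l ls ih =>
    intro cur h
    by_cases hl : pvHdr l = true
    · simp only [pvSegs, hl, if_true, List.takeWhile_cons, List.dropWhile_cons,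
        Bool.not_true, Bool.false_eq_true, if_false]
      rw [ih [pvAfter l] (by simp)]
      simp [pvBSeg, pvBHead, hl, h]
    · simp only [pvSegs, hl, Bool.false_eq_true, if_false, List.takeWhile_cons,
        List.dropWhile_cons, Bool.not_eq_eq_eq_not, Bool.not_true]
      rw [ih (cur ++ [PySem.Str.strip l]) (by simp)]
      simp [List.append_assoc]

lemma pvSegs_eq_pvBSeg (ls : List String) : pvSegs [] ls = pvBSeg ls := by
  cases ls with
  | nil => simp [pvSegs, pvBSeg]
  | cons l ls =>
    by_cases hl : pvHdr l = true
    · simp only [pvSegs, hl, if_true, ne_eq, not_true_eq_false]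
      rw [pvSegs_run ls [pvAfter l] (by simp)]
      simp [pvBSeg, pvBHead, hl]
    · simp only [pvSegs, hl, Bool.false_eq_true, if_false, List.nil_append]
      rw [pvSegs_run ls [PySem.Str.strip l] (by simp)]
      simp [pvBSeg, pvBHead, hl]

-- ===== VERDICT (by name: the statement is the Claim_ definition above) =====
theorem parse_gpt_panels_py_spec : Claim_equal_parse_gpt_panels_py := by
  intro gpt_content num_panels _
  unfold Spec_parse_gpt_panels_py
  show parse_gpt_panels_py gpt_content num_panels = parse_gpt_panels_py_alt gpt_content num_panels
  simp only [parse_gpt_panels_py, parse_gpt_panels_py_alt]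
  generalize (PySem.Str.split? (PySem.Str.strip gpt_content) "\n").getD [] = ls
  have hA := pvA_lem ls [] []
  simp only [List.nil_append] at hA
  rw [hA, pvSegs_eq_pvBSeg]
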